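-- pv_equiv track=rewrite | github.com/vrslev/cmp-cov | src/cmp_cov/cli.py | compute_line_runs
-- ===== SOURCE A (Python) =====
-- import typing
--
-- MAX_RUN_GAP: typing.Final = 2
--
-- def compute_line_runs(lineno_list: list[int]) -> list[tuple[int, int]]:
--     if not lineno_list:
--         return []
--     sorted_linenos: typing.Final = sorted(lineno_list)
--     runs_acc: list[tuple[int, int]] = []
--     run_start = run_prev = sorted_linenos[0]
--     for current_lineno in sorted_linenos[1:]:
--         if current_lineno - run_prev - 1 <= MAX_RUN_GAP:
--             run_prev = current_lineno
--             continue
--         runs_acc.append((run_start, run_prev - run_start + 1))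
--         run_start = run_prev = current_lineno
--     runs_acc.append((run_start, run_prev - run_start + 1))
--     return runs_acc
-- ===== SOURCE B (Python) =====
-- MAX_RUN_GAP = 2
--
-- def compute_line_runs(lineno_list):
--     s = sorted(lineno_list)
--     if not s:
--         return []
--     pairs = list(zip(s, s[1:]))
--     starts = [s[0]] + [b for a, b in pairs if b - a - 1 > MAX_RUN_GAP]
--     ends = [a for a, b in pairs if b - a - 1 > MAX_RUN_GAP] + [s[-1]]
--     return [(st, en - st + 1) for st, en in zip(starts, ends)]
-- ===== Notes on version B (the rewrite author's own statement) =====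
-- stated objective: alternative
-- what changed: Instead of A's stateful single pass maintaining (run_start, run_prev) and emitting spans inside the loop, B declaratively filters adjacent pairs of the sorted list for break points, builds the starts and ends lists in two separate comprehensions, and zips them into (start, end-start+1) runs.
import Mathlib
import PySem

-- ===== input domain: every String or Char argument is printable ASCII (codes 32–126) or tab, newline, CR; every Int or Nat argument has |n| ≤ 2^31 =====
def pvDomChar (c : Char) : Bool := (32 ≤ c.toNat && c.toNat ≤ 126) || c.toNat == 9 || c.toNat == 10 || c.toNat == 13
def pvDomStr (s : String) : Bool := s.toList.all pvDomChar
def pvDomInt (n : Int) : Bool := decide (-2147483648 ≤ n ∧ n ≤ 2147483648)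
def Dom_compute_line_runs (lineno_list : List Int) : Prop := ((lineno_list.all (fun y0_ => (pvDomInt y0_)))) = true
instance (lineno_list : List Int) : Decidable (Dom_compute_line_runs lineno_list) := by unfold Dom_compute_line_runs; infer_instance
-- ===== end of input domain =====

-- B replaces A's stateful loop by filtering adjacent pairs of the sorted list for break
-- points and zipping the resulting starts/ends lists; an alternative decomposition,
-- same O(n log n) cost.

-- ===== PORT A =====
-- the loop body of A's for-loop over sorted_linenos[1:], state = (run_start, run_prev, runs_acc)
def pvStepA (st : Int × Int × List (Int × Int)) (c : Int) : Int × Int × List (Int × Int) :=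
  if c - st.2.1 - 1 ≤ 2 then (st.1, c, st.2.2)
  else (c, c, st.2.2 ++ [(st.1, st.2.1 - st.1 + 1)])

def compute_line_runs (lineno_list : List Int) : List (Int × Int) :=
  if lineno_list = [] then []
  else
    match PySem.List.sorted lineno_list (fun x => x) false with
    | [] => []  -- unreachable: sorted of a nonempty list is nonempty
    | h :: t =>
      let st := t.foldl pvStepA (h, h, [])
      st.2.2 ++ [(st.1, st.2.1 - st.1 + 1)]

-- ===== PORT B =====
-- Source B's break test on an adjacent pair (a, b): b - a - 1 > MAX_RUN_GAP
def pvBreak (ab : Int × Int) : Bool := ab.2 - ab.1 - 1 > 2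

def compute_line_runs_alt (lineno_list : List Int) : List (Int × Int) :=
  match PySem.List.sorted lineno_list (fun x => x) false with
  | [] => []
  | h :: t =>
    let pairs := (h :: t).zip t          -- zip(s, s[1:])
    let brk := pairs.filter pvBreak
    let starts := h :: brk.map Prod.snd
    let ends := brk.map Prod.fst ++ [(h :: t).getLastD 0]   -- s[-1]; list nonempty here
    (starts.zip ends).map (fun se => (se.1, se.2 - se.1 + 1))

-- ===== PRECONDITION & SPEC =====
def Spec_compute_line_runs (lineno_list : List Int) (out : List (Int × Int)) : Prop := out = compute_line_runs_alt lineno_list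
instance (lineno_list : List Int) (out : List (Int × Int)) : Decidable (Spec_compute_line_runs lineno_list out) := by unfold Spec_compute_line_runs; infer_instance

-- ===== CLAIM (what is proved, stated in full; the proofs are below) =====
def Claim_equal_compute_line_runs : Prop := ∀ (lineno_list : List Int), Dom_compute_line_runs lineno_list → Spec_compute_line_runs lineno_list (compute_line_runs lineno_list)

-- ===== LEMMAS AND PROOFS =====

-- A's fold only ever appends to its accumulator component
theorem pv_foldA_acc (xs : List Int) : ∀ (s p : Int) (a : List (Int × Int)),
    xs.foldl pvStepA (s, p, a)
      = ((xs.foldl pvStepA (s, p, [])).1, (xs.foldl pvStepA (s, p, [])).2.1,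
         a ++ (xs.foldl pvStepA (s, p, [])).2.2) := by
  induction xs with
  | nil => intro s p a; simp
  | cons x xs ih =>
    intro s p a
    simp only [List.foldl_cons, pvStepA]
    split_ifs with h
    · exact ih s x a
    · simp only [List.nil_append]
      rw [ih x x (a ++ [(s, p - s + 1)]), ih x x [(s, p - s + 1)]]
      simp

-- main invariant: A's fold result equals B's zip of starts and ends,
-- where p plays the role of the element preceding xs
theorem pv_key (xs : List Int) : ∀ (s p : Int),
    (xs.foldl pvStepA (s, p, [])).2.2
      ++ [((xs.foldl pvStepA (s, p, [])).1,
           (xs.foldl pvStepA (s, p, [])).2.1 - (xs.foldl pvStepA (s, p, [])).1 + 1)]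
    = (((s :: (((p :: xs).zip xs).filter pvBreak).map Prod.snd).zip
        ((((p :: xs).zip xs).filter pvBreak).map Prod.fst ++ [(p :: xs).getLastD 0])).map
        (fun se => (se.1, se.2 - se.1 + 1))) := by
  induction xs with
  | nil => intro s p; simp
  | cons x xs ih =>
    intro s p
    simp only [List.foldl_cons, pvStepA]
    by_cases h : x - p - 1 ≤ 2
    · rw [if_pos h]
      have hb : pvBreak (p, x) = false := by simp [pvBreak]; omega
      simp only [List.zip_cons_cons, List.filter_cons, hb]
      simpa using ih s x
    · rw [if_neg h]
      have hb : pvBreak (p, x) = true := by simp [pvBreak]; omega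
      simp only [List.nil_append, List.zip_cons_cons, List.filter_cons, hb]
      rw [pv_foldA_acc xs x x [(s, p - s + 1)]]
      simp only [List.map_cons, List.append_assoc]
      have := ih x x
      simp only [List.cons_append] at this ⊢
      rw [show ((p :: x :: xs).getLastD 0) = ((x :: xs).getLastD 0) by simp]
      simp [this]

-- ===== VERDICT (by name: the statement is the Claim_ definition above) =====
theorem compute_line_runs_spec : Claim_equal_compute_line_runs := by
  unfold Claim_equal_compute_line_runs
  intro l _
  unfold Spec_compute_line_runs compute_line_runs compute_line_runs_alt
  by_cases hl : l = []
  · subst hl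
    rw [show PySem.List.sorted ([] : List Int) (fun x => x) false = []
        from (PySem.List.sorted_eq_nil_iff _ _ _).mpr rfl]
    simp
  · simp only [if_neg hl]
    have hs : PySem.List.sorted l (fun x => x) false ≠ [] :=
      fun h => hl ((PySem.List.sorted_eq_nil_iff _ _ _).mp h)
    obtain ⟨h, t, ht⟩ := List.exists_cons_of_ne_nil hs
    rw [ht]
    exact pv_key t h h
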